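-- pv_equiv track=rewrite | github.com/nicassiolab/SARS-pseudoU | scripts/sgRNAs_mods_detection/scripts/peakcalling/nanocompore_peak_calling.py | filter_for_u
-- ===== SOURCE A (Python) =====
-- def filter_for_u(gmm_pvalues, positions, gpositions, kmers, lors):
--     '''
--     '''
--     gmm_pvalues_of_Us = []
--     positions_of_Us = []
--     gpositions_of_Us = []
--     kmers_of_Us = []
--     lors_of_Us = []
--     for gmm, pos, gpos, kmer, lor in zip(gmm_pvalues, positions, gpositions, kmers, lors):
--         if 'U' in kmer or 'T' in kmer:
--             gmm_pvalues_of_Us.append(gmm)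
--             positions_of_Us.append(pos)
--             gpositions_of_Us.append(gpos)
--             kmers_of_Us.append(kmer)
--             lors_of_Us.append(lor)
--
--     return gmm_pvalues_of_Us, positions_of_Us, gpositions_of_Us, kmers_of_Us, lors_of_Us
-- ===== SOURCE B (Python) =====
-- def filter_for_u(gmm_pvalues, positions, gpositions, kmers, lors):
--     n = min(len(gmm_pvalues), len(positions), len(gpositions), len(kmers), len(lors))
--     idx = [i for i in range(n) if 'U' in kmers[i] or 'T' in kmers[i]]
--     return ([gmm_pvalues[i] for i in idx],
--             [positions[i] for i in idx],
--             [gpositions[i] for i in idx],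
--             [kmers[i] for i in idx],
--             [lors[i] for i in idx])
-- ===== Notes on version B (the rewrite author's own statement) =====
-- stated objective: alternative
-- what changed: B first computes the list of kept indices by scanning only the kmers (up to the shortest input length), then gathers each of the five output columns by indexing into its input list, instead of A's single zipped loop appending rows to five parallel accumulators.
import Mathlib
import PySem

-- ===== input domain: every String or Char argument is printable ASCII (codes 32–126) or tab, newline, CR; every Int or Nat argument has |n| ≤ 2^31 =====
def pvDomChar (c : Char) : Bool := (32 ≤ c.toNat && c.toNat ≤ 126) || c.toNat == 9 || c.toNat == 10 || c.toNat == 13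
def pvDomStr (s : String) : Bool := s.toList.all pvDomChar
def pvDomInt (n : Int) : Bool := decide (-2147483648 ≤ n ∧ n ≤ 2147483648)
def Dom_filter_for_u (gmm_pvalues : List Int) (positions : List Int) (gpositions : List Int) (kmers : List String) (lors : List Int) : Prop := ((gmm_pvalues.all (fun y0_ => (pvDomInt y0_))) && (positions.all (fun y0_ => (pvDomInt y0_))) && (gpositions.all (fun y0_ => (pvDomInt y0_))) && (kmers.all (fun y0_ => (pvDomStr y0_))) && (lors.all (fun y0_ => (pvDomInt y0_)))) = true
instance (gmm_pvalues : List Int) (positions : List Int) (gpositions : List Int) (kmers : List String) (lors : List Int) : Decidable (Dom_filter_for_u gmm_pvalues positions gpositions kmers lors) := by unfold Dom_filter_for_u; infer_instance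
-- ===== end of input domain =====

-- B computes the kept index list by scanning only the kmers, then gathers the five columns by indexing; A loops over the zipped rows appending to five accumulators (alternative decomposition, same cost).

-- row predicate: 'U' in kmer or 'T' in kmer
def hasUT (k : String) : Bool := PySem.Str.isIn "U" k || PySem.Str.isIn "T" k

-- Python's zip over five lists (stops at the shortest)
def pyZip5 (a b c : List Int) (d : List String) (e : List Int) : List (Int × Int × Int × String × Int) :=
  match a, b, c, d, e with
  | x :: a, y :: b, z :: c, w :: d, v :: e => (x, y, z, w, v) :: pyZip5 a b c d e
  | _, _, _, _, _ => []

-- ===== PORT A =====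
def filter_for_u (gmm_pvalues : List Int) (positions : List Int) (gpositions : List Int) (kmers : List String) (lors : List Int) : List Int × List Int × List Int × List String × List Int :=
  (pyZip5 gmm_pvalues positions gpositions kmers lors).foldl
    (fun st r =>
      if hasUT r.2.2.2.1 then
        (st.1 ++ [r.1], st.2.1 ++ [r.2.1], st.2.2.1 ++ [r.2.2.1], st.2.2.2.1 ++ [r.2.2.2.1], st.2.2.2.2 ++ [r.2.2.2.2])
      else st)
    ([], [], [], [], [])

-- ===== PORT B =====
def filter_for_u_alt (gmm_pvalues : List Int) (positions : List Int) (gpositions : List Int) (kmers : List String) (lors : List Int) : List Int × List Int × List Int × List String × List Int :=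
  let n := min (min (min (min gmm_pvalues.length positions.length) gpositions.length) kmers.length) lors.length
  let idx := (List.range n).filter (fun i => hasUT (kmers.getD i ""))
  (idx.map (fun i => gmm_pvalues.getD i 0),
   idx.map (fun i => positions.getD i 0),
   idx.map (fun i => gpositions.getD i 0),
   idx.map (fun i => kmers.getD i ""),
   idx.map (fun i => lors.getD i 0))

-- ===== PRECONDITION & SPEC =====
def Spec_filter_for_u (gmm_pvalues : List Int) (positions : List Int) (gpositions : List Int) (kmers : List String) (lors : List Int) (out : List Int × List Int × List Int × List String × List Int) : Prop := out = filter_for_u_alt gmm_pvalues positions gpositions kmers lors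
instance (gmm_pvalues : List Int) (positions : List Int) (gpositions : List Int) (kmers : List String) (lors : List Int) (out : List Int × List Int × List Int × List String × List Int) : Decidable (Spec_filter_for_u gmm_pvalues positions gpositions kmers lors out) := by unfold Spec_filter_for_u; infer_instance

-- ===== CLAIM =====
def Claim_equal_filter_for_u : Prop := ∀ (gmm_pvalues : List Int) (positions : List Int) (gpositions : List Int) (kmers : List String) (lors : List Int), Dom_filter_for_u gmm_pvalues positions gpositions kmers lors → Spec_filter_for_u gmm_pvalues positions gpositions kmers lors (filter_for_u gmm_pvalues positions gpositions kmers lors)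

-- ===== LEMMAS AND PROOFS =====

-- A's fold with accumulators = accumulators ++ column maps of the filtered rows
theorem foldA_eq (L : List (Int × Int × Int × String × Int))
    (a b c : List Int) (d : List String) (e : List Int) :
    L.foldl (fun st r =>
      if hasUT r.2.2.2.1 then
        (st.1 ++ [r.1], st.2.1 ++ [r.2.1], st.2.2.1 ++ [r.2.2.1], st.2.2.2.1 ++ [r.2.2.2.1], st.2.2.2.2 ++ [r.2.2.2.2])
      else st) (a, b, c, d, e)
    = (a ++ (L.filter (fun r => hasUT r.2.2.2.1)).map (·.1),
       b ++ (L.filter (fun r => hasUT r.2.2.2.1)).map (·.2.1),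
       c ++ (L.filter (fun r => hasUT r.2.2.2.1)).map (·.2.2.1),
       d ++ (L.filter (fun r => hasUT r.2.2.2.1)).map (·.2.2.2.1),
       e ++ (L.filter (fun r => hasUT r.2.2.2.1)).map (·.2.2.2.2)) := by
  induction L generalizing a b c d e with
  | nil => simp
  | cons r L ih =>
    by_cases h : hasUT r.2.2.2.1 <;> simp [List.foldl_cons, h, ih]

-- the zipped rows, expressed by indexing up to the shortest length
theorem pyZip5_eq_range (a b c : List Int) (d : List String) (e : List Int) :
    pyZip5 a b c d e =
      (List.range (min (min (min (min a.length b.length) c.length) d.length) e.length)).map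
        (fun i => (a.getD i 0, b.getD i 0, c.getD i 0, d.getD i "", e.getD i 0)) := by
  induction a generalizing b c d e with
  | nil => cases b <;> cases c <;> cases d <;> cases e <;> simp [pyZip5]
  | cons x a ih =>
    cases b with
    | nil => simp [pyZip5]
    | cons y b =>
      cases c with
      | nil => simp [pyZip5]
      | cons z c =>
        cases d with
        | nil => simp [pyZip5]
        | cons w d =>
          cases e with
          | nil => simp [pyZip5]
          | cons v e =>
            simp [pyZip5, ih, Nat.succ_min_succ, List.range_succ_eq_map,
              List.map_map, Function.comp_def]

-- ===== VERDICT =====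
theorem filter_for_u_spec : Claim_equal_filter_for_u := by
  intro g p gp k l _
  show _ = _
  unfold filter_for_u filter_for_u_alt
  rw [foldA_eq, pyZip5_eq_range]
  simp [List.filter_map, List.map_map, Function.comp_def]
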